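-- pv_equiv track=rewrite | github.com/juanpaez12/LaboratorioVCSRemoto | preinforme10_JuanPaezAlejandraLozano.py.py | ejercicio2
-- ===== SOURCE A (Python) =====
-- def ejercicio2(utilidad):
--     cant = len(utilidad)
--     mayor=utilidad[0]
--     menor=utilidad[0]
--     for i in range(0,cant):
--         if mayor<utilidad[i]:
--             mayor=utilidad[i]
--         if menor>utilidad[i]:
--             menor=utilidad[i]
--     dif = mayor - menor
--     return dif
-- ===== SOURCE B (Python) =====
-- def ejercicio2(utilidad):
--     s = sorted(utilidad)
--     return s[-1] - s[0]
-- ===== Notes on version B (the rewrite author's own statement) =====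
-- stated objective: simpler
-- what changed: Replaces A's index-driven scan that maintains running max and min with a sort-then-endpoints computation: sorted copy, last element minus first.
import Mathlib
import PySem

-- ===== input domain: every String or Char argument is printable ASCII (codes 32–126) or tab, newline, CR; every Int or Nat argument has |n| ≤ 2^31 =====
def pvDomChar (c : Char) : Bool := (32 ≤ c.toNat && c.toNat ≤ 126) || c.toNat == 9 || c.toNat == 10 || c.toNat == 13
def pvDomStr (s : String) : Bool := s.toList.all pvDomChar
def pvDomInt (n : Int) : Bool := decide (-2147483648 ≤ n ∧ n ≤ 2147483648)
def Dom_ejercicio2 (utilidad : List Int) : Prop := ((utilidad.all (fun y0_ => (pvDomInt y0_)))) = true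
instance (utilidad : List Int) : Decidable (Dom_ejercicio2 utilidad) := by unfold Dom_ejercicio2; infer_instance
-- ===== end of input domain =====

-- B replaces A's single index-driven max/min scan by a sort-then-endpoints computation (simpler decomposition, not faster).


-- ===== PORT A =====
-- literal port of A: utilidad[0] raises IndexError on [], excluded by Pre_; the [] branch value is never claimed.
def ejercicio2 (utilidad : List Int) : Int :=
  match utilidad with
  | [] => 0
  | x :: _ =>
    let p := (PySem.List.pyRange 0 (utilidad.length : Int) 1).foldl
      (fun (p : Int × Int) i =>
        let v := PySem.List.pyGetD utilidad i 0
        (if p.1 < v then v else p.1, if p.2 > v then v else p.2)) (x, x)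
    p.1 - p.2

-- ===== PORT B =====
def ejercicio2_alt (utilidad : List Int) : Int :=
  let s := PySem.List.sorted utilidad (fun x => x) false
  PySem.List.pyGetD s (-1) 0 - PySem.List.pyGetD s 0 0

-- ===== PRECONDITION & SPEC =====
-- Pre_ excludes only the empty list, on which both A (utilidad[0]) and B (s[-1]) raise IndexError.
def Pre_ejercicio2 (utilidad : List Int) : Prop := utilidad ≠ []
instance (utilidad : List Int) : Decidable (Pre_ejercicio2 utilidad) := by unfold Pre_ejercicio2; infer_instance
def pvWitness_ejercicio2 : List Int := [3, -1, 7, 7]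
def Spec_ejercicio2 (utilidad : List Int) (out : Int) : Prop := out = ejercicio2_alt utilidad
instance (utilidad : List Int) (out : Int) : Decidable (Spec_ejercicio2 utilidad out) := by unfold Spec_ejercicio2; infer_instance

-- ===== CLAIM (what is proved, stated in full; the proofs are below) =====
def Claim_equal_ejercicio2 : Prop := ∀ (utilidad : List Int), Dom_ejercicio2 utilidad → Pre_ejercicio2 utilidad → Spec_ejercicio2 utilidad (ejercicio2 utilidad)

-- ===== LEMMAS AND PROOFS =====

theorem foldl_pair_minmax (u : List Int) : ∀ (a b : Int),
    u.foldl (fun (p : Int × Int) v =>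
      (if p.1 < v then v else p.1, if p.2 > v then v else p.2)) (a, b)
      = (u.foldl max a, u.foldl min b) := by
  induction u with
  | nil => intro a b; simp
  | cons y t ih =>
      intro a b
      simp only [List.foldl_cons, ih]
      congr 1
      · congr 1; rw [max_def]; split_ifs <;> omega
      · congr 1; rw [min_def]; split_ifs <;> omega

theorem foldl_min_mem (t : List Int) : ∀ a, t.foldl min a = a ∨ t.foldl min a ∈ t := by
  induction t with
  | nil => intro a; simp
  | cons y s ih =>
      intro a
      simp only [List.foldl_cons]
      rcases ih (min a y) with h | h
      · rcases le_total a y with h' | h'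
        · left; rw [h, min_eq_left h']
        · right; rw [h, min_eq_right h']; simp
      · right; simp [h]

theorem foldl_max_mem (t : List Int) : ∀ a, t.foldl max a = a ∨ t.foldl max a ∈ t := by
  induction t with
  | nil => intro a; simp
  | cons y s ih =>
      intro a
      simp only [List.foldl_cons]
      rcases ih (max a y) with h | h
      · rcases le_total a y with h' | h'
        · right; rw [h, max_eq_right h']; simp
        · left; rw [h, max_eq_left h']
      · right; simp [h]

theorem foldl_min_le (t : List Int) : ∀ a, t.foldl min a ≤ a ∧ ∀ y ∈ t, t.foldl min a ≤ y := by
  induction t with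
  | nil => intro a; simp
  | cons y s ih =>
      intro a
      obtain ⟨h1, h2⟩ := ih (min a y)
      refine ⟨le_trans h1 (min_le_left _ _), ?_⟩
      intro z hz
      rcases List.mem_cons.mp hz with rfl | hz
      · exact le_trans h1 (min_le_right _ _)
      · exact h2 z hz

theorem foldl_max_ge (t : List Int) : ∀ a, a ≤ t.foldl max a ∧ ∀ y ∈ t, y ≤ t.foldl max a := by
  induction t with
  | nil => intro a; simp
  | cons y s ih =>
      intro a
      obtain ⟨h1, h2⟩ := ih (max a y)
      refine ⟨le_trans (le_max_left _ _) h1, ?_⟩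
      intro z hz
      rcases List.mem_cons.mp hz with rfl | hz
      · exact le_trans (le_max_right _ _) h1
      · exact h2 z hz

theorem le_getLast_of_pairwise (s : List Int) (hp : s.Pairwise (· ≤ ·)) (h : s ≠ []) :
    ∀ y ∈ s, y ≤ s.getLast h := by
  induction s with
  | nil => exact absurd rfl h
  | cons a t ih =>
      intro y hy
      cases t with
      | nil => simp at hy; simp [hy]
      | cons b r =>
          rw [List.getLast_cons (by simp)]
          rcases List.mem_cons.mp hy with rfl | hy
          · have hmem := List.getLast_mem (l := b :: r) (by simp)
            exact le_trans ((List.pairwise_cons.mp hp).1 _ hmem) le_rfl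
          · exact ih (List.pairwise_cons.mp hp).2 (by simp) y hy

-- ===== VERDICT (by name: the statement is the Claim_ definition above) =====
theorem ejercicio2_spec : Claim_equal_ejercicio2 := by
  intro u _ hpre
  unfold Spec_ejercicio2
  match u, hpre with
  | x :: xs, _ =>
    set u := x :: xs with hu
    -- A's side: reduce the range-fold to a list fold, then to (foldl max, foldl min)
    have hA : ejercicio2 u = u.foldl max x - u.foldl min x := by
      show (let p := (PySem.List.pyRange 0 (u.length : Int) 1).foldl
              (fun (p : Int × Int) i =>
                let v := PySem.List.pyGetD u i 0
                (if p.1 < v then v else p.1, if p.2 > v then v else p.2)) (x, x)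
            p.1 - p.2) = _
      rw [PySem.List.foldl_pyRange_zero_pyGetD' u 0
            (fun (p : Int × Int) v =>
              (if p.1 < v then v else p.1, if p.2 > v then v else p.2)) (x, x)]
      rw [foldl_pair_minmax u x x]
    -- B's side
    have hne : u ≠ [] := by simp [hu]
    set s := PySem.List.sorted u (fun x => x) false with hs
    have hsp : s.Perm u := PySem.List.sorted_perm u _ _
    have hsne : s ≠ [] := by
      intro h
      have hl := hsp.length_eq
      rw [h, hu] at hl
      simp at hl
    have hpw : s.Pairwise (fun a b : Int => a ≤ b) := PySem.List.sorted_pairwise u _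
    have hB : ejercicio2_alt u = s.getLast hsne - PySem.List.pyGetD s 0 0 := by
      show PySem.List.pyGetD s (-1) 0 - PySem.List.pyGetD s 0 0 = _
      rw [PySem.List.pyGetD_neg_one s 0 hsne]
    obtain ⟨m, t, hmt⟩ := List.exists_cons_of_ne_nil hsne
    have hmem_su : ∀ y, y ∈ s ↔ y ∈ u := fun y => hsp.mem_iff
    -- the head of s is the minimum of u
    have hm_le : ∀ y ∈ u, m ≤ y := by
      intro y hy
      have : y ∈ s := (hmem_su y).mpr hy
      rw [hmt] at this
      rcases List.mem_cons.mp this with rfl | h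
      · exact le_rfl
      · exact (List.pairwise_cons.mp (hmt ▸ hpw)).1 y h
    have hmin : u.foldl min x = m := by
      have hmu : m ∈ u := (hmem_su m).mp (by simp [hmt])
      have hfm : u.foldl min x ∈ u := by
        rw [hu]
        simp only [List.foldl_cons, min_self]
        rcases foldl_min_mem xs x with h | h
        · simp [h]
        · simp [h]
      have h1 : u.foldl min x ≤ m := by
        obtain ⟨ha, hb⟩ := foldl_min_le xs x
        rw [hu] at hmu ⊢
        simp only [List.foldl_cons, min_self]
        rcases List.mem_cons.mp hmu with rfl | h
        · exact ha
        · exact hb m h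
      exact le_antisymm h1 (hm_le _ hfm)
    -- the last of s is the maximum of u
    have hlast_ge : ∀ y ∈ u, y ≤ s.getLast hsne :=
      fun y hy => le_getLast_of_pairwise s hpw hsne y ((hmem_su y).mpr hy)
    have hmax : u.foldl max x = s.getLast hsne := by
      have hlu : s.getLast hsne ∈ u := (hmem_su _).mp (List.getLast_mem hsne)
      have hfm : u.foldl max x ∈ u := by
        rw [hu]
        simp only [List.foldl_cons, max_self]
        rcases foldl_max_mem xs x with h | h
        · simp [h]
        · simp [h]
      have h1 : s.getLast hsne ≤ u.foldl max x := by
        obtain ⟨ha, hb⟩ := foldl_max_ge xs x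
        rw [hu] at hlu ⊢
        simp only [List.foldl_cons, max_self]
        rcases List.mem_cons.mp hlu with h | h
        · rw [h]; exact ha
        · exact hb _ h
      exact le_antisymm (hlast_ge _ hfm) h1
    have hgz : PySem.List.pyGetD s 0 0 = m := by
      rw [hmt, PySem.List.pyGetD_zero_cons]
    rw [hA, hB, hmax, hmin, hgz]
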